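-- pv_equiv track=rewrite | github.com/mdsrahman/fso_final_2015 | march_15_final_fso_placement_algo/final_fso/src/map_to_graph_generator.py | gridRayTrace
-- ===== SOURCE A (Python) =====
-- def gridRayTrace(x0, y0, x1, y1):
--   '''
--   returns grids intersected by line (x0,y0,x1,y1)
--   '''
--   visited_grids = []
--   dx = abs(x0 - x1)
--   dy = abs(y0 - y1)
--   x = x0
--   y = y0
--   n = 1 + dx + dy
--   x_inc = 1 if x1 > x0 else -1
--   y_inc = 1 if y1 > y0 else -1
--   error = dx - dy
--   dx *= 2
--   dy *= 2
--
--   while n>0: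
--     visited_grids.append((x,y))
--     if error >=0:
--       x += x_inc
--       error -= dy
--     else:
--       y += y_inc
--       error += dx
--     n -= 1
--   return visited_grids
-- ===== SOURCE B (Python) =====
-- def gridRayTrace(x0, y0, x1, y1):
--     dx = abs(x0 - x1)
--     dy = abs(y0 - y1)
--     x_inc = 1 if x1 > x0 else -1
--     y_inc = 1 if y1 > y0 else -1
--     # stage 1: build the two sorted lists of grid-line crossing keys:
--     # the line leaves its i-th column at a parameter proportional to (2*i+1)*dy
--     # and its j-th row at (2*j+1)*dx.
--     x_events = [(2 * i + 1) * dy for i in range(dx)]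
--     y_events = [(2 * j + 1) * dx for j in range(dy)]
--     # stage 2: merge the two event lists into a move sequence (ties -> x move)
--     moves = []
--     a = 0
--     b = 0
--     while a < dx and b < dy:
--         if x_events[a] <= y_events[b]:
--             moves.append(True)
--             a += 1
--         else:
--             moves.append(False)
--             b += 1
--     moves.extend([True] * (dx - a))
--     moves.extend([False] * (dy - b))
--     # stage 3: scan the move sequence into the visited cells
--     cells = [(x0, y0)]
--     x, y = x0, y0
--     for m in moves:
--         if m:
--             x += x_inc
--         else:
--             y += y_inc
--         cells.append((x, y))
--     return cells
-- ===== Notes on version B (the rewrite author's own statement) =====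
-- stated objective: alternative
-- what changed: Replaces A's incremental Bresenham error walk by a staged event-merge algorithm: build the two sorted lists of column/row crossing keys (2i+1)*dy and (2j+1)*dx, merge them into a boolean move sequence (ties take the x move), then scan the moves into the visited cells.
import Mathlib
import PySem

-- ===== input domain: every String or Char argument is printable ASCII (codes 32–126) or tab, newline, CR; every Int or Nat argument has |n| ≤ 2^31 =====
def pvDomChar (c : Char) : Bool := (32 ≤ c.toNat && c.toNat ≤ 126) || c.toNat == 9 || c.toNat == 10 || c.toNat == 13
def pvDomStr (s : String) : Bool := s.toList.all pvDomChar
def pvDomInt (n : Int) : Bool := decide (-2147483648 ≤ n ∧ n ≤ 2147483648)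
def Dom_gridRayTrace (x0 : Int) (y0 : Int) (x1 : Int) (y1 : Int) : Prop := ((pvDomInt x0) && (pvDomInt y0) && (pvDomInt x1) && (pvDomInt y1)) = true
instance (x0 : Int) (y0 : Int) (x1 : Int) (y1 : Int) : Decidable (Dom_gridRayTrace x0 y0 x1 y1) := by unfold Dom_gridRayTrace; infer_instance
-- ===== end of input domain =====

-- B replaces A's incremental Bresenham error walk by an event-list algorithm:
-- build the sorted lists of column/row crossing keys, merge them into a move
-- sequence, then scan the moves into cells (objective: alternative, same cost).

-- ===== PORT A =====
-- A's while loop: fuel n = 1+dx+dy iterations, state (x, y, error).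
def gridRayTraceLoopA (dx2 dy2 x_inc y_inc : Int) : Nat → Int → Int → Int → List (Int × Int)
  | 0, _, _, _ => []
  | n+1, x, y, error =>
    (x, y) ::
      (if error ≥ 0 then gridRayTraceLoopA dx2 dy2 x_inc y_inc n (x + x_inc) y (error - dy2)
       else gridRayTraceLoopA dx2 dy2 x_inc y_inc n x (y + y_inc) (error + dx2))

def gridRayTrace (x0 : Int) (y0 : Int) (x1 : Int) (y1 : Int) : List (Int × Int) :=
  let dx := |x0 - x1|
  let dy := |y0 - y1|
  let n := 1 + dx + dy
  let x_inc : Int := if x1 > x0 then 1 else -1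
  let y_inc : Int := if y1 > y0 then 1 else -1
  let error := dx - dy
  gridRayTraceLoopA (dx * 2) (dy * 2) x_inc y_inc n.toNat x0 y0 error

-- ===== PORT B =====
-- stage 2 of Source B: the while-merge consumes the two event lists from the front;
-- the two trailing `extend`s are the replicate branches.
def gridMergeMoves : List Int → List Int → List Bool
  | xk :: xs, yk :: ys =>
    if xk ≤ yk then true :: gridMergeMoves xs (yk :: ys)
    else false :: gridMergeMoves (xk :: xs) ys
  | xs, [] => List.replicate xs.length true
  | [], ys => List.replicate ys.length false
  termination_by xs ys => xs.length + ys.length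

-- stage 3 of Source B: fold the move sequence into cells, appending after each move.
def gridScanCells (x_inc y_inc : Int) : Int → Int → List Bool → List (Int × Int)
  | _, _, [] => []
  | x, y, true :: ms => (x + x_inc, y) :: gridScanCells x_inc y_inc (x + x_inc) y ms
  | x, y, false :: ms => (x, y + y_inc) :: gridScanCells x_inc y_inc x (y + y_inc) ms

def gridRayTrace_alt (x0 : Int) (y0 : Int) (x1 : Int) (y1 : Int) : List (Int × Int) :=
  let dx := |x0 - x1|
  let dy := |y0 - y1|
  let x_inc : Int := if x1 > x0 then 1 else -1
  let y_inc : Int := if y1 > y0 then 1 else -1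
  let x_events := (PySem.List.pyRange 0 dx 1).map (fun i => (2 * i + 1) * dy)
  let y_events := (PySem.List.pyRange 0 dy 1).map (fun j => (2 * j + 1) * dx)
  let moves := gridMergeMoves x_events y_events
  (x0, y0) :: gridScanCells x_inc y_inc x0 y0 moves

-- ===== PRECONDITION & SPEC =====
def Spec_gridRayTrace (x0 : Int) (y0 : Int) (x1 : Int) (y1 : Int) (out : List (Int × Int)) : Prop := out = gridRayTrace_alt x0 y0 x1 y1
instance (x0 : Int) (y0 : Int) (x1 : Int) (y1 : Int) (out : List (Int × Int)) : Decidable (Spec_gridRayTrace x0 y0 x1 y1 out) := by unfold Spec_gridRayTrace; infer_instance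

-- ===== CLAIM (what is proved, stated in full; the proofs are below) =====
def Claim_equal_gridRayTrace : Prop := ∀ (x0 : Int) (y0 : Int) (x1 : Int) (y1 : Int), Dom_gridRayTrace x0 y0 x1 y1 → Spec_gridRayTrace x0 y0 x1 y1 (gridRayTrace x0 y0 x1 y1)

-- ===== LEMMAS AND PROOFS =====

-- one-step unfolding of A's loop
theorem gridRayTraceLoopA_succ (dx2 dy2 x_inc y_inc : Int) (n : Nat) (x y error : Int) :
    gridRayTraceLoopA dx2 dy2 x_inc y_inc (n + 1) x y error
      = (x, y) ::
          (if error ≥ 0 then gridRayTraceLoopA dx2 dy2 x_inc y_inc n (x + x_inc) y (error - dy2)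
           else gridRayTraceLoopA dx2 dy2 x_inc y_inc n x (y + y_inc) (error + dx2)) := rfl

-- pattern-overlap equations for the trailing-extend cases of the merge
theorem gridMergeMoves_nil_left (ys : List Int) :
    gridMergeMoves [] ys = List.replicate ys.length false := by
  cases ys <;> simp [gridMergeMoves]

-- merging a nonempty x-event list against no y-events
theorem gridMergeMoves_nil_right (xs : List Int) :
    gridMergeMoves xs [] = List.replicate xs.length true := by
  cases xs <;> simp [gridMergeMoves]

-- Invariant: after a x-steps and b y-steps, A's loop (remaining fuel
-- (dx-a)+(dy-b)+1, error = dx - dy - 2a*dy + 2b*dx) emits the current cell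
-- followed by the scan of the merge of the remaining event tails.
theorem gridRayTrace_loop_eq (x_inc y_inc dx dy : Int)
    (hdx : 0 ≤ dx) (hdy : 0 ≤ dy) :
    ∀ (n : Nat) (a b x y : Int), 0 ≤ a → a ≤ dx → 0 ≤ b → b ≤ dy →
      ((dx - a) + (dy - b)).toNat = n →
      gridRayTraceLoopA (dx * 2) (dy * 2) x_inc y_inc (n + 1) x y
          (dx - dy - 2 * (a * dy) + 2 * (b * dx))
        = (x, y) :: gridScanCells x_inc y_inc x y
            (gridMergeMoves ((PySem.List.pyRange a dx 1).map (fun i => (2 * i + 1) * dy))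
                            ((PySem.List.pyRange b dy 1).map (fun j => (2 * j + 1) * dx))) := by
  intro n
  induction n with
  | zero =>
    intro a b x y ha0 hadx hb0 hbdy hn
    have ha : a = dx := by omega
    have hb : b = dy := by omega
    rw [ha, hb, PySem.List.pyRange_one_eq_nil (le_refl dx), PySem.List.pyRange_one_eq_nil (le_refl dy)]
    simp only [List.map_nil, gridMergeMoves, List.length_nil, List.replicate]
    rw [gridRayTraceLoopA_succ]
    simp [gridRayTraceLoopA, gridScanCells]
  | succ n ih =>
    intro a b x y ha0 hadx hb0 hbdy hn
    by_cases hax : a < dx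
    · by_cases hby : b < dy
      · -- both event lists nonempty: the merge head comparison is A's error test
        rw [PySem.List.pyRange_one_cons hax, PySem.List.pyRange_one_cons hby]
        simp only [List.map_cons, gridMergeMoves]
        by_cases hkey : (2 * a + 1) * dy ≤ (2 * b + 1) * dx
        · have herr : dx - dy - 2 * (a * dy) + 2 * (b * dx) ≥ 0 := by nlinarith
          have h2 : dx - dy - 2 * (a * dy) + 2 * (b * dx) - dy * 2
              = dx - dy - 2 * ((a + 1) * dy) + 2 * (b * dx) := by ring
          have H := ih (a + 1) b (x + x_inc) y (by omega) (by omega) hb0 hbdy (by omega)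
          rw [PySem.List.pyRange_one_cons hby] at H
          simp only [List.map_cons] at H
          rw [gridRayTraceLoopA_succ, if_pos herr, if_pos hkey, h2, H]
          simp [gridScanCells]
        · have herr : ¬ (dx - dy - 2 * (a * dy) + 2 * (b * dx) ≥ 0) := by
            intro h; exact hkey (by nlinarith)
          have h2 : dx - dy - 2 * (a * dy) + 2 * (b * dx) + dx * 2
              = dx - dy - 2 * (a * dy) + 2 * ((b + 1) * dx) := by ring
          have H := ih a (b + 1) x (y + y_inc) ha0 hadx (by omega) (by omega) (by omega)
          rw [PySem.List.pyRange_one_cons hax] at H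
          simp only [List.map_cons] at H
          rw [gridRayTraceLoopA_succ, if_neg herr, if_neg hkey, h2, H]
          simp [gridScanCells]
      · -- y-events exhausted (b = dy): A's error is nonnegative, merge emits an x move
        have hb : b = dy := by omega
        rw [hb]
        have herr : dx - dy - 2 * (a * dy) + 2 * (dy * dx) ≥ 0 := by nlinarith
        have h2 : dx - dy - 2 * (a * dy) + 2 * (dy * dx) - dy * 2
            = dx - dy - 2 * ((a + 1) * dy) + 2 * (dy * dx) := by ring
        have H := ih (a + 1) dy (x + x_inc) y (by omega) (by omega) hdy (le_refl dy) (by omega)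
        rw [PySem.List.pyRange_one_eq_nil (le_refl dy)] at H
        simp only [List.map_nil, gridMergeMoves_nil_right] at H
        rw [PySem.List.pyRange_one_eq_nil (le_refl dy), PySem.List.pyRange_one_cons hax]
        simp only [List.map_nil, List.map_cons]
        rw [gridMergeMoves_nil_right, List.length_cons, List.replicate_succ]
        rw [gridRayTraceLoopA_succ, if_pos herr, h2, H]
        simp [gridScanCells]
    · -- x-events exhausted (a = dx, so b < dy): A's error is negative, merge emits a y move
      have ha : a = dx := by omega
      have hby : b < dy := by omega
      rw [ha]
      have herr : ¬ (dx - dy - 2 * (dx * dy) + 2 * (b * dx) ≥ 0) := by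
        intro h; nlinarith
      have h2 : dx - dy - 2 * (dx * dy) + 2 * (b * dx) + dx * 2
          = dx - dy - 2 * (dx * dy) + 2 * ((b + 1) * dx) := by ring
      have H := ih dx (b + 1) x (y + y_inc) hdx (le_refl dx) (by omega) (by omega) (by omega)
      rw [PySem.List.pyRange_one_eq_nil (le_refl dx)] at H
      simp only [List.map_nil] at H
      rw [PySem.List.pyRange_one_eq_nil (le_refl dx), PySem.List.pyRange_one_cons hby]
      simp only [List.map_nil, List.map_cons, gridMergeMoves]
      rw [gridRayTraceLoopA_succ, if_neg herr, h2, H, gridMergeMoves_nil_left]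
      simp only [List.length_cons, List.length_map, PySem.List.length_pyRange_one]
      rw [List.replicate_succ]
      simp [gridScanCells]

-- ===== VERDICT (by name: the statement is the Claim_ definition above) =====
theorem gridRayTrace_spec : Claim_equal_gridRayTrace := by
  intro x0 y0 x1 y1 _
  unfold Spec_gridRayTrace gridRayTrace gridRayTrace_alt
  simp only []
  have hdx : 0 ≤ |x0 - x1| := abs_nonneg _
  have hdy : 0 ≤ |y0 - y1| := abs_nonneg _
  have hfuel : (1 + |x0 - x1| + |y0 - y1|).toNat
      = ((|x0 - x1| - 0) + (|y0 - y1| - 0)).toNat + 1 := by omega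
  rw [hfuel]
  have := gridRayTrace_loop_eq (if x1 > x0 then 1 else -1) (if y1 > y0 then 1 else -1)
    (|x0 - x1|) (|y0 - y1|) hdx hdy ((|x0 - x1| - 0) + (|y0 - y1| - 0)).toNat
    0 0 x0 y0 (le_refl 0) hdx (le_refl 0) hdy rfl
  simpa using this
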